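-- pv_equiv track=rewrite | github.com/ORANZINO/Algorithm | Programmers/괄호 변환.py | solution
-- ===== SOURCE A (Python) =====
-- def solution(p):
--     def check(s):
--         stack = []
--         for i in range(len(s)):
--             if not stack and s[i] == ')':
--                 return False
--             elif stack and stack[-1] == '(' and s[i] == ')':
--                 stack.pop()
--             else:
--                 stack.append(s[i])
--         return not stack
--
--     def convert(s):
--         result = ''
--         for char in s:
--             if char == '(':
--                 result += ')'
--             else:
--                 result += '('
--         return result
--
--     answer = ''
--
--     for i in range(2, len(p) + 1, 2):
--         if p[:i].count('(') == i // 2: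
--             u, v = p[:i], p[i:]
--             if check(u):
--                 answer = u + solution(v)
--             else:
--                 answer = '(' + solution(v) + ')' + convert(u[1:-1])
--             break
--
--     return answer
-- ===== SOURCE B (Python) =====
-- def solution(p):
--     # one-pass helpers instead of A's quadratic prefix re-counting and stack simulation
--
--     def balanced_prefix(s):
--         # length of the shortest non-empty prefix whose opening chars are half of it, 0 if none
--         bal = 0
--         for i, ch in enumerate(s):
--             bal += 1 if ch == '(' else -1
--             if bal == 0:
--                 return i + 1
--         return 0
--
--     def correct(s):
--         # s is a properly nested string of parentheses only
--         bal = 0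
--         for ch in s:
--             if ch == '(':
--                 bal += 1
--             elif ch == ')':
--                 if bal == 0:
--                     return False
--                 bal -= 1
--             else:
--                 return False
--         return bal == 0
--
--     i = balanced_prefix(p)
--     if i == 0:
--         return ''
--     u, v = p[:i], p[i:]
--     if correct(u):
--         return u + solution(v)
--     return '(' + solution(v) + ')' + ''.join(')' if c == '(' else '(' for c in u[1:-1])
-- ===== Notes on version B (the rewrite author's own statement) =====
-- stated objective: faster
-- what changed: The split point is found by one running-balance counter pass (and the correctness test uses a counter instead of a stack), replacing A's re-count of opening parentheses over every even prefix, which is quadratic per level.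
import Mathlib
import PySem

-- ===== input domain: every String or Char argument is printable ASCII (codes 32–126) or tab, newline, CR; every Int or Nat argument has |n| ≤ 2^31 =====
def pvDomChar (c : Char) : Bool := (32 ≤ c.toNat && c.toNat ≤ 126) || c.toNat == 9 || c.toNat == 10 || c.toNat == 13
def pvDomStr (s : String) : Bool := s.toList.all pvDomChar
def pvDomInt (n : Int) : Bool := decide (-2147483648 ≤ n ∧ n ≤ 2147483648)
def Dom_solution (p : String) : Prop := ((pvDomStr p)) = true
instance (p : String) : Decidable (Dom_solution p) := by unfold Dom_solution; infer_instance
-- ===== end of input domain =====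

-- B replaces A's quadratic per-level search (re-counting '(' over every even prefix, stack-based check)
-- by a single running-balance pass per level; return values are identical.

-- ===== PORT A =====
-- check(s): stack simulation; the Lean list's head is Python's top of stack (append = cons, pop = tail)
def checkA : List Char → List Char → Bool
  | stack, [] => stack.isEmpty
  | stack, c :: rest =>
    if stack.isEmpty && c == ')' then false
    else if !stack.isEmpty && stack.headD ' ' == '(' && c == ')' then checkA stack.tail rest
    else checkA (c :: stack) rest

-- convert(s): result += mapped char
def convertA (s : List Char) : List Char :=
  s.foldl (fun result char => result ++ [if char == '(' then ')' else '(']) []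

-- the loop condition: the count of opening parens in the prefix of length i equals i // 2
def condA (l : List Char) (i : Int) : Bool :=
  (PySem.List.count (PySem.List.slice l none (some i)) '(' : Int) == PySem.Int.floordiv i 2

-- 'for i in range(2, len(p)+1, 2): if cond: …; break' — first i satisfying the condition
def findA (l : List Char) : List Int → Option Int
  | [] => none
  | i :: rest => if condA l i then some i else findA l rest

theorem findA_mem {l : List Char} : ∀ {is : List Int} {i : Int}, findA l is = some i → i ∈ is := by
  intro is
  induction is with
  | nil => intro i h; simp [findA] at h
  | cons a rest ih =>
    intro i h
    by_cases hc : condA l a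
    · simp [findA, hc] at h; simp [h]
    · simp [findA, hc] at h; exact List.mem_cons_of_mem _ (ih h)

theorem findA_slice_lt {l : List Char} {i : Int}
    (h : findA l (PySem.List.pyRange 2 ((l.length : Int) + 1) 2) = some i) :
    (PySem.List.slice l (some i) none).length < l.length := by
  have hm := findA_mem h
  rw [PySem.List.mem_pyRange_iff_of_pos (by norm_num)] at hm
  obtain ⟨h2, hlt, -⟩ := hm
  obtain ⟨k, rfl⟩ : ∃ k : Nat, i = (k : Int) := ⟨i.toNat, by omega⟩
  rw [PySem.List.slice_from_natCast]
  simp only [List.length_drop]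
  omega

def solutionList (l : List Char) : List Char :=
  match h : findA l (PySem.List.pyRange 2 ((l.length : Int) + 1) 2) with
  | none => []
  | some i =>
    let u := PySem.List.slice l none (some i)
    let v := PySem.List.slice l (some i) none
    if checkA [] u then u ++ solutionList v
    else '(' :: (solutionList v ++ ')' :: convertA (PySem.List.slice u (some 1) (some (-1))))
termination_by l.length
decreasing_by all_goals exact findA_slice_lt h

def solution (p : String) : String := String.mk (solutionList p.toList)

-- ===== PORT B =====
-- balanced_prefix: running counter, returns i+1 at the first zero balance, 0 if none
def balB (bal : Int) (i : Nat) : List Char → Nat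
  | [] => 0
  | ch :: rest =>
    let bal' := bal + (if ch == '(' then 1 else -1)
    if bal' == 0 then i + 1 else balB bal' (i + 1) rest

-- correct(s): counter instead of a stack
def checkB (bal : Int) : List Char → Bool
  | [] => bal == 0
  | ch :: rest =>
    if ch == '(' then checkB (bal + 1) rest
    else if ch == ')' then (if bal == 0 then false else checkB (bal - 1) rest)
    else false

-- the join-comprehension
def convertB (s : List Char) : List Char := s.map (fun c => if c == '(' then ')' else '(')

theorem balB_cons (b : Int) (j : Nat) (c : Char) (rest : List Char) :
    balB b j (c :: rest) = if b + (if c = '(' then 1 else -1) = 0 then j + 1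
      else balB (b + (if c = '(' then 1 else -1)) (j + 1) rest := by
  rw [balB]; simp only [beq_iff_eq]

theorem balB_le : ∀ (l : List Char) (b : Int) (j : Nat),
    balB b j l ≠ 0 → j < balB b j l ∧ balB b j l ≤ j + l.length := by
  intro l
  induction l with
  | nil => intro b j h; simp [balB] at h
  | cons c rest ih =>
    intro b j h
    rw [balB_cons] at h ⊢
    by_cases hz : b + (if c = '(' then 1 else -1) = 0
    · rw [if_pos hz] at h ⊢; simp only [List.length_cons]; omega
    · rw [if_neg hz] at h ⊢
      have := ih _ _ h
      simp only [List.length_cons]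
      omega

def solutionAltList (l : List Char) : List Char :=
  if h : balB 0 0 l = 0 then []
  else
    let u := l.take (balB 0 0 l)
    let v := l.drop (balB 0 0 l)
    if checkB 0 u then u ++ solutionAltList v
    else '(' :: (solutionAltList v ++ ')' :: convertB u.tail.dropLast)
termination_by l.length
decreasing_by all_goals
  simp only [List.length_drop]
  have := balB_le l 0 0 h
  omega

def solution_alt (p : String) : String := String.mk (solutionAltList p.toList)

-- ===== PRECONDITION & SPEC =====
def Spec_solution (p : String) (out : String) : Prop := out = solution_alt p
instance (p : String) (out : String) : Decidable (Spec_solution p out) := by unfold Spec_solution; infer_instance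

-- ===== CLAIM (what is proved, stated in full; the proofs are below) =====
def Claim_equal_solution : Prop := ∀ (p : String), Dom_solution p → Spec_solution p (solution p)

-- ===== LEMMAS AND PROOFS =====

-- the running balance of a list: twice the number of opening parens, minus the length
def pbal (s : List Char) : Int := 2 * (PySem.List.count s '(' : Int) - s.length

theorem pbal_nil : pbal [] = 0 := by simp [pbal, PySem.List.count]

theorem pbal_cons (c : Char) (s : List Char) :
    pbal (c :: s) = (if c == '(' then 1 else -1) + pbal s := by
  simp only [pbal, PySem.List.count, List.count_cons, List.length_cons]
  by_cases h : c = '(' <;> simp [h] <;> push_cast <;> ring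

-- balB's characterisation: 0 means no non-empty prefix balances; otherwise it returns j + k for the
-- minimal k ≥ 1 whose prefix balances
theorem balB_spec : ∀ (l : List Char) (b : Int) (j : Nat),
    (balB b j l = 0 → ∀ k, 1 ≤ k → k ≤ l.length → b + pbal (l.take k) ≠ 0) ∧
    (balB b j l ≠ 0 → ∃ k, balB b j l = j + k ∧ 1 ≤ k ∧ k ≤ l.length ∧ b + pbal (l.take k) = 0 ∧
      ∀ m, 1 ≤ m → m < k → b + pbal (l.take m) ≠ 0) := by
  intro l
  induction l with
  | nil =>
    intro b j
    refine ⟨fun _ k hk1 hk2 => by simp at hk2; omega, fun h => absurd rfl h⟩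
  | cons c rest ih =>
    intro b j
    have htake : ∀ m : Nat, b + pbal ((c :: rest).take (m + 1)) =
        (b + (if c = '(' then 1 else -1)) + pbal (rest.take m) := by
      intro m; rw [List.take_succ_cons, pbal_cons]; simp only [beq_iff_eq]; ring
    by_cases hz : b + (if c = '(' then 1 else -1) = 0
    · constructor
      · intro h0; rw [balB_cons, if_pos hz] at h0; omega
      · intro _
        refine ⟨1, ?_, le_refl 1, by simp, ?_, fun m hm1 hm2 => by omega⟩
        · rw [balB_cons, if_pos hz]
        · rw [htake 0]; simpa [pbal_nil] using hz
    · have hstep : balB b j (c :: rest) = balB (b + (if c = '(' then 1 else -1)) (j + 1) rest := by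
        rw [balB_cons, if_neg hz]
      obtain ⟨ih0, ihs⟩ := ih (b + (if c = '(' then 1 else -1)) (j + 1)
      constructor
      · intro h0 k hk1 hk2
        rw [hstep] at h0
        match k, hk1 with
        | 1, _ => rw [htake 0]; simpa [pbal_nil] using hz
        | (m + 2), _ =>
          rw [htake (m + 1)]
          exact ih0 h0 (m + 1) (by omega) (by simpa using hk2)
      · intro h0
        rw [hstep] at h0 ⊢
        obtain ⟨k', hval, hk1, hk2, hbal, hmin⟩ := ihs h0
        refine ⟨k' + 1, by omega, by omega, by simpa using Nat.add_le_add_right hk2 1,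
          by rw [htake k']; exact hbal, ?_⟩
        intro m hm1 hm2
        match m, hm1 with
        | 1, _ => rw [htake 0]; simpa [pbal_nil] using hz
        | (m' + 2), _ => rw [htake (m' + 1)]; exact hmin (m' + 1) (by omega) (by omega)

theorem findA_eq_find? (l : List Char) : ∀ (is : List Int), findA l is = is.find? (condA l) := by
  intro is
  induction is with
  | nil => rfl
  | cons a rest ih =>
    rw [findA, List.find?_cons]
    by_cases hc : condA l a <;> simp [hc, ih]

theorem find?_sorted_eq_some {p : Int → Bool} {i : Int} :
    ∀ (is : List Int), is.Pairwise (· < ·) → i ∈ is → p i = true →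
      (∀ j ∈ is, j < i → p j = false) → is.find? p = some i := by
  intro is
  induction is with
  | nil => intro _ h; simp at h
  | cons a rest ih =>
    intro hpw hmem hpi hmin
    rw [List.find?_cons]
    by_cases hpa : p a
    · simp only [hpa, if_pos]
      rcases List.mem_cons.mp hmem with rfl | hr
      · rfl
      · have ha : a < i := (List.pairwise_cons.mp hpw).1 _ hr
        rw [hmin a (by simp) ha] at hpa; simp at hpa
    · simp only [show p a = false by simpa using hpa]
      have hir : i ∈ rest := by
        rcases List.mem_cons.mp hmem with rfl | h
        · exact absurd hpi (by simpa using hpa)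
        · exact h
      exact ih (List.pairwise_cons.mp hpw).2 hir hpi (fun j hj => hmin j (List.mem_cons_of_mem _ hj))

theorem pyRange_two_pairwise (b : Int) : (PySem.List.pyRange 2 b 2).Pairwise (· < ·) := by
  rw [PySem.List.pyRange_of_pos 2 b (by norm_num)]
  exact List.Pairwise.map _ (fun a b h => by omega) List.pairwise_lt_range

-- the condition A tests on an even prefix length k ≤ |l| is exactly 'pbal of the prefix is 0'
theorem condA_iff (l : List Char) (k : Nat) (hk : k ≤ l.length) (h2 : 2 ∣ k) :
    condA l (k : Int) = true ↔ pbal (l.take k) = 0 := by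
  unfold condA
  rw [PySem.List.slice_to_natCast]
  obtain ⟨m, rfl⟩ := h2
  have hfd : PySem.Int.floordiv ((2 * m : Nat) : Int) 2 = (m : Int) := by
    rw [PySem.Int.floordiv_eq_ediv_of_pos (by norm_num)]; push_cast; omega
  rw [hfd, beq_iff_eq, pbal]
  have hlen : (List.take (2 * m) l).length = 2 * m := by
    simp [List.length_take]; omega
  rw [hlen]
  constructor <;> intro h <;> push_cast at h ⊢ <;> omega

-- the central lemma: A's first even balanced prefix length equals B's running-counter result
theorem find_eq (l : List Char) :
    findA l (PySem.List.pyRange 2 ((l.length : Int) + 1) 2) =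
      if balB 0 0 l = 0 then none else some ((balB 0 0 l : Nat) : Int) := by
  rw [findA_eq_find?]
  by_cases h0 : balB 0 0 l = 0
  · rw [if_pos h0, List.find?_eq_none]
    intro x hx
    rw [PySem.List.mem_pyRange_iff_of_pos (by norm_num)] at hx
    obtain ⟨hx2, hxlt, hxdvd⟩ := hx
    obtain ⟨k, rfl⟩ : ∃ k : Nat, x = (k : Int) := ⟨x.toNat, by omega⟩
    intro hc
    have hk : k ≤ l.length := by omega
    have hdvd : 2 ∣ k := by omega
    exact (balB_spec l 0 0).1 h0 k (by omega) hk (by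
      simpa using (condA_iff l k hk hdvd).mp hc)
  · rw [if_neg h0]
    obtain ⟨k, hval, hk1, hk2, hbal, hmin⟩ := (balB_spec l 0 0).2 h0
    simp only [Nat.zero_add] at hval
    rw [hval]
    -- k is even, since the balanced prefix has length k
    have hlen : (l.take k).length = k := by simp; omega
    have hdvd : 2 ∣ k := by
      have := hbal; rw [pbal, hlen] at this
      simp only [Int.zero_add] at this ⊢
      omega
    refine find?_sorted_eq_some _ (pyRange_two_pairwise _) ?_ ?_ ?_
    · rw [PySem.List.mem_pyRange_iff_of_pos (by norm_num)]
      refine ⟨by omega, by omega, by omega⟩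
    · exact (condA_iff l k hk2 hdvd).mpr (by simpa using hbal)
    · intro j hj hjk
      rw [PySem.List.mem_pyRange_iff_of_pos (by norm_num)] at hj
      obtain ⟨hj2, hjlt, hjdvd⟩ := hj
      obtain ⟨m, rfl⟩ : ∃ m : Nat, j = (m : Int) := ⟨j.toNat, by omega⟩
      have hm : m ≤ l.length := by omega
      rw [Bool.eq_false_iff]
      intro hc
      exact hmin m (by omega) (by omega) (by
        simpa using (condA_iff l m hm (by omega)).mp hc)

-- if the stack holds any char other than an opening paren, A's check can never succeed
theorem checkA_junk : ∀ (s stack : List Char), (∃ c ∈ stack, c ≠ '(') → checkA stack s = false := by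
  intro s
  induction s with
  | nil =>
    intro stack ⟨c, hc, _⟩
    rw [checkA]
    cases stack with
    | nil => simp at hc
    | cons a t => simp
  | cons x rest ih =>
    intro stack ⟨c, hc, hcne⟩
    rw [checkA]
    by_cases h1 : stack.isEmpty && x == ')'
    · simp [h1]
    · rw [if_neg h1]
      by_cases h2 : !stack.isEmpty && stack.headD ' ' == '(' && x == ')'
      · rw [if_pos h2]
        refine ih _ ⟨c, ?_, hcne⟩
        simp only [Bool.and_eq_true, beq_iff_eq, Bool.not_eq_eq_eq_not, Bool.not_false] at h2
        cases stack with
        | nil => simp at hc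
        | cons a t =>
          rcases List.mem_cons.mp hc with rfl | hct
          · exact absurd (by simpa using h2.1.2) hcne
          · simpa using hct
      · rw [if_neg h2]
        exact ih _ ⟨c, List.mem_cons_of_mem _ hc, hcne⟩

-- a stack of n opening parens behaves exactly like the counter n
theorem check_eq : ∀ (s : List Char) (n : Nat),
    checkA (List.replicate n '(') s = checkB (n : Int) s := by
  intro s
  induction s with
  | nil =>
    intro n
    cases n with
    | zero => rfl
    | succ m =>
      rw [checkA, checkB]
      simp [List.replicate_succ]
      omega
  | cons c rest ih =>
    intro n
    by_cases hc1 : c = '('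
    · subst hc1
      have l1 : checkA (List.replicate n '(') ('(' :: rest) =
          checkA (List.replicate (n + 1) '(') rest := by
        rw [checkA, if_neg (by simp), if_neg (by simp), List.replicate_succ]
      have r1 : checkB (n : Int) ('(' :: rest) = checkB ((n : Int) + 1) rest := by
        rw [checkB, if_pos (by simp)]
      rw [l1, r1, ih (n + 1)]
      congr 1
    · by_cases hc2 : c = ')'
      · subst hc2
        cases n with
        | zero =>
          rw [checkA, if_pos (by simp), checkB, if_neg (by simp), if_pos (by simp),
            if_pos (by simp)]
        | succ m =>
          have l2 : checkA (List.replicate (m + 1) '(') (')' :: rest) =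
              checkA (List.replicate m '(') rest := by
            rw [List.replicate_succ, checkA, if_neg (by simp), if_pos (by simp), List.tail_cons]
          have r2 : checkB ((m + 1 : Nat) : Int) (')' :: rest) =
              checkB (((m + 1 : Nat) : Int) - 1) rest := by
            rw [checkB, if_neg (by simp), if_pos (by simp),
              if_neg (by simp only [beq_iff_eq]; push_cast; omega)]
          rw [l2, r2, ih m]
          congr 1
          push_cast
          ring
      · have l3 : checkA (List.replicate n '(') (c :: rest) =
            checkA (c :: List.replicate n '(') rest := by
          rw [checkA, if_neg (by simp [hc2]), if_neg (by simp [hc2])]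
        rw [l3, checkA_junk rest _ ⟨c, List.mem_cons_self, hc1⟩,
          checkB, if_neg (by simp [hc1]), if_neg (by simp [hc2])]

theorem convert_eq (s : List Char) : convertA s = convertB s := by
  unfold convertA convertB
  rw [PySem.List.foldl_append_singleton_eq_map]
  simp

theorem slice_one_neg_one (u : List Char) :
    PySem.List.slice u (some 1) (some (-1)) = u.tail.dropLast := by
  cases u with
  | nil => rfl
  | cons a t =>
    show List.take (PySem.List.clampIdx (a :: t).length (-1) - PySem.List.clampIdx (a :: t).length 1)
        (List.drop (PySem.List.clampIdx (a :: t).length 1) (a :: t)) = (a :: t).tail.dropLast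
    rw [PySem.List.clampIdx_neg_one]
    have h1 : PySem.List.clampIdx (a :: t).length 1 = 1 := by
      simp [PySem.List.clampIdx]
    rw [h1, List.tail_cons, List.dropLast_eq_take]
    simp only [List.length_cons, List.drop_one, List.tail_cons]
    congr 1

theorem solution_list_eq : ∀ (n : Nat) (l : List Char), l.length < n →
    solutionList l = solutionAltList l := by
  intro n
  induction n with
  | zero => intro l h; omega
  | succ n ih =>
    intro l hl
    rw [solutionList.eq_def, solutionAltList.eq_def]
    by_cases h0 : balB 0 0 l = 0
    · rw [dif_pos h0]
      split
      · rfl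
      · rename_i i heq
        rw [find_eq, if_pos h0] at heq
        exact absurd heq (by simp)
    · rw [dif_neg h0]
      split
      · rename_i heq
        rw [find_eq, if_neg h0] at heq
        exact absurd heq (by simp)
      · rename_i i heq
        rw [find_eq, if_neg h0] at heq
        obtain rfl : ((balB 0 0 l : Nat) : Int) = i := by simpa using heq
        simp only [PySem.List.slice_to_natCast, PySem.List.slice_from_natCast]
        have hrec : solutionList (l.drop (balB 0 0 l)) = solutionAltList (l.drop (balB 0 0 l)) := by
          refine ih _ ?_
          have := balB_le l 0 0 h0
          simp only [List.length_drop]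
          omega
        rw [show checkA [] (l.take (balB 0 0 l)) = checkB 0 (l.take (balB 0 0 l)) by
          simpa using check_eq (l.take (balB 0 0 l)) 0]
        by_cases hck : checkB 0 (l.take (balB 0 0 l)) = true
        · rw [if_pos hck, if_pos hck, hrec]
        · rw [if_neg hck, if_neg hck, hrec, slice_one_neg_one, convert_eq]

-- ===== VERDICT (by name: the statement is the Claim_ definition above) =====
theorem solution_spec : Claim_equal_solution := by
  intro p _
  unfold Spec_solution solution solution_alt
  rw [solution_list_eq (p.toList.length + 1) p.toList (by omega)]
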